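-- pv_equiv track=rewrite | github.com/boldsamurai/cc-monitor | src/cc_usagemonitor/project_slug.py | _name_candidates
-- ===== SOURCE A (Python) =====
-- import itertools
--
-- _NAME_SEPARATORS = ("-", "_", ".")
--
-- def _name_candidates(parts: tuple[str, ...]) -> list[str]:
--     """All possible name spellings for an N-part slug tail.
--
--     For 5 parts that's 3^4 = 81 candidates — cheap. Cached by tuple
--     identity so the same name parts only enumerate once per process.
--     """
--     if len(parts) == 1:
--         return [parts[0]]
--     out: list[str] = []
--     for combo in itertools.product(_NAME_SEPARATORS, repeat=len(parts) - 1):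
--         s = parts[0]
--         for sep, p in zip(combo, parts[1:]):
--             s += sep + p
--         out.append(s)
--     return out
-- ===== SOURCE B (Python) =====
-- _NAME_SEPARATORS = ("-", "_", ".")
--
-- def _name_candidates(parts):
--     out = [parts[0]]
--     for p in parts[1:]:
--         out = [s + sep + p for s in out for sep in _NAME_SEPARATORS]
--     return out
-- ===== Notes on version B (the rewrite author's own statement) =====
-- stated objective: simpler
-- what changed: Drops itertools.product and the length-1 special case: B grows the candidate list incrementally, extending every prefix by each separator for each next part, producing the same list in the same order.
import Mathlib
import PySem

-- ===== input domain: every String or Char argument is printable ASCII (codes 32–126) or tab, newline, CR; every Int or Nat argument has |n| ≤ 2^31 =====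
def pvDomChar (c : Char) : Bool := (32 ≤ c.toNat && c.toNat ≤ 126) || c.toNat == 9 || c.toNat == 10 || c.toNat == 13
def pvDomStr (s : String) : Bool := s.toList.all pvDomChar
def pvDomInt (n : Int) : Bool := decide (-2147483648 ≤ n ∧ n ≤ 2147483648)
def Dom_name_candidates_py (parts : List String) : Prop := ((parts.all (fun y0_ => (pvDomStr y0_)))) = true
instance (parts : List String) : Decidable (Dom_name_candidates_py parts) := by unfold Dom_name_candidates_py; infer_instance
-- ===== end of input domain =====

-- B incrementally extends every prefix by each separator; same list, same order as A's itertools.product enumeration (objective: simpler).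

-- ===== PORT A =====
def pvSeps : List String := ["-", "_", "."]

-- itertools.product(_NAME_SEPARATORS, repeat=n): first slot varies slowest
def pvProdRepeat (n : Nat) : List (List String) :=
  match n with
  | 0 => [[]]
  | n + 1 => pvSeps.flatMap (fun sep => (pvProdRepeat n).map (fun c => sep :: c))

def name_candidates_py (parts : List String) : List String :=
  if parts.length == 1 then [parts.headD ""]
  else
    (pvProdRepeat (parts.length - 1)).map (fun combo =>
      (combo.zip parts.tail).foldl (fun s sp => s ++ sp.1 ++ sp.2) (parts.headD ""))

-- ===== PORT B =====
def name_candidates_py_alt (parts : List String) : List String :=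
  match parts with
  | [] => []  -- Python B raises IndexError here; excluded by Pre_
  | p0 :: rest =>
    rest.foldl (fun out p => out.flatMap (fun s => pvSeps.map (fun sep => s ++ sep ++ p))) [p0]

-- ===== PRECONDITION & SPEC =====
-- Pre_ excludes only the empty tuple, on which A raises ValueError (itertools.product(repeat=-1)).
def Pre_name_candidates_py (parts : List String) : Prop := parts ≠ []
instance (parts : List String) : Decidable (Pre_name_candidates_py parts) := by unfold Pre_name_candidates_py; infer_instance
def pvWitness_name_candidates_py : List String := ["abc", "def"]
def Spec_name_candidates_py (parts : List String) (out : List String) : Prop := out = name_candidates_py_alt parts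
instance (parts : List String) (out : List String) : Decidable (Spec_name_candidates_py parts out) := by unfold Spec_name_candidates_py; infer_instance

-- ===== CLAIM (what is proved, stated in full; the proofs are below) =====
def Claim_equal_name_candidates_py : Prop := ∀ (parts : List String), Dom_name_candidates_py parts → Pre_name_candidates_py parts → Spec_name_candidates_py parts (name_candidates_py parts)

-- ===== LEMMAS AND PROOFS =====

-- The common abstract value: all spellings of s0 followed by rest with every separator choice.
def pvSpell (rest : List String) (s0 : String) : List String :=
  match rest with
  | [] => [s0]
  | p :: r => pvSeps.flatMap (fun sep => pvSpell r (s0 ++ sep ++ p))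

theorem pvA_spell (rest : List String) (s0 : String) :
    (pvProdRepeat rest.length).map (fun combo =>
      (combo.zip rest).foldl (fun s sp => s ++ sp.1 ++ sp.2) s0) = pvSpell rest s0 := by
  induction rest generalizing s0 with
  | nil => simp [pvProdRepeat, pvSpell]
  | cons p r ih =>
    simp only [List.length_cons, pvProdRepeat, pvSpell, List.map_flatMap, List.map_map]
    refine List.flatMap_congr (fun sep _ => ?_)
    simpa [Function.comp, List.zip_cons_cons] using ih (s0 ++ sep ++ p)

theorem pvB_spell (rest : List String) (xs : List String) :
    rest.foldl (fun out p => out.flatMap (fun s => pvSeps.map (fun sep => s ++ sep ++ p))) xs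
      = xs.flatMap (pvSpell rest) := by
  induction rest generalizing xs with
  | nil => simp [pvSpell]
  | cons p r ih =>
    rw [List.foldl_cons, ih]
    rw [List.flatMap_assoc]
    refine List.flatMap_congr (fun s _ => ?_)
    simp [pvSpell, List.flatMap_map]

-- ===== VERDICT (by name: the statement is the Claim_ definition above) =====
theorem name_candidates_py_spec : Claim_equal_name_candidates_py := by
  intro parts _ hpre
  match parts, hpre with
  | p0 :: rest, _ =>
    show name_candidates_py (p0 :: rest) = name_candidates_py_alt (p0 :: rest)
    have hB : name_candidates_py_alt (p0 :: rest) = pvSpell rest p0 := by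
      simp [name_candidates_py_alt, pvB_spell]
    rw [hB]
    unfold name_candidates_py
    by_cases h : rest = []
    · subst h; simp [pvSpell]
    · have hlen : ¬ (((p0 :: rest).length == 1) = true) := by simp [h]
      rw [if_neg hlen]
      simpa using pvA_spell rest p0
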